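-- pv_equiv track=rewrite | github.com/jinanmh123/NoteExtract | main.py | get_dur
-- ===== SOURCE A (Python) =====
-- def get_dur(avgs, duration):
--     durs = []
--     notes = [avg[0] for avg in avgs]
--     times = [avg[2] for avg in avgs]
--     for i, note in enumerate(notes):
--         if i < len(times)-1:
--             durs.append(times[i+1]-times[i])
--         else:
--             durs.append(duration-times[i])
--
--     for i in range(len(durs)):
--         avgs[i].append(durs[i])
--
--     return avgs
-- ===== SOURCE B (Python) =====
-- def get_dur(avgs, duration):
--     nxt = duration
--     for a in reversed(avgs):
--         t = a[2]
--         a.append(nxt - t)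
--         nxt = t
--     return avgs
-- ===== Notes on version B (the rewrite author's own statement) =====
-- stated objective: simpler
-- what changed: Traverses avgs in reverse carrying the next onset in an accumulator (initialised to duration), appending nxt - t to each row as it goes, which removes the notes/times/durs intermediate lists, the i < len-1 boundary branch and the second index loop of A.
import Mathlib
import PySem

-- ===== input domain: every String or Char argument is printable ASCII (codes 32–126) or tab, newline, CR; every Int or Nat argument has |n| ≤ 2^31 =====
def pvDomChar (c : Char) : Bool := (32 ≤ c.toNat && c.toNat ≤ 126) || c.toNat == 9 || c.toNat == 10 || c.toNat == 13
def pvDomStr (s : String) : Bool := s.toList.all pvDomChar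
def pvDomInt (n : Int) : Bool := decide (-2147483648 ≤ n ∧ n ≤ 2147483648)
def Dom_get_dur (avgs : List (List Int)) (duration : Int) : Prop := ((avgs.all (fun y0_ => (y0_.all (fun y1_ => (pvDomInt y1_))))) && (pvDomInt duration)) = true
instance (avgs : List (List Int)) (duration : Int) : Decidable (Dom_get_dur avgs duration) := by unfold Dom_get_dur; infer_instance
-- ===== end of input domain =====

-- B traverses avgs in reverse with a carried next-onset accumulator (no boundary branch,
-- no durs list, no second loop); both A and B mutate the rows of avgs in place (same
-- mutation); the equivalence proved is about the return value.


-- ===== PORT A =====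
-- avg[0] / avg[2] are exact via pyGetD under Pre_ (every row has length ≥ 3);
-- the in-place 'avgs[i].append(durs[i])' loop is modelled by List.set on index i.
def get_dur (avgs : List (List Int)) (duration : Int) : List (List Int) :=
  let notes := avgs.map (fun avg => PySem.List.pyGetD avg 0 0)
  let times := avgs.map (fun avg => PySem.List.pyGetD avg 2 0)
  let durs := (PySem.List.enumerate notes).foldl (fun durs p =>
      if p.1 < (times.length : Int) - 1 then
        durs ++ [PySem.List.pyGetD times (p.1 + 1) 0 - PySem.List.pyGetD times p.1 0]
      else
        durs ++ [duration - PySem.List.pyGetD times p.1 0]) []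
  (PySem.List.pyRange 0 (durs.length : Int) 1).foldl (fun st i =>
      st.set i.toNat (PySem.List.pyGetD st i [] ++ [PySem.List.pyGetD durs i 0])) avgs

-- ===== PORT B =====
-- the 'for a in reversed(avgs)' loop is a foldl over avgs.reverse whose state is
-- (nxt, rows built so far); prepending each finished row rebuilds the original order.
def get_dur_alt (avgs : List (List Int)) (duration : Int) : List (List Int) :=
  (avgs.reverse.foldl (fun (p : Int × List (List Int)) a =>
      let t := PySem.List.pyGetD a 2 0
      (t, (a ++ [p.1 - t]) :: p.2)) (duration, [])).2

-- ===== PRECONDITION & SPEC =====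
-- Pre_ excludes exactly the inputs where Python A raises IndexError: a row with fewer than 3 entries (avg[0]/avg[2]).
def Pre_get_dur (avgs : List (List Int)) (duration : Int) : Prop := ∀ a ∈ avgs, 3 ≤ a.length
instance (avgs : List (List Int)) (duration : Int) : Decidable (Pre_get_dur avgs duration) := by unfold Pre_get_dur; infer_instance
def pvWitness_get_dur : List (List Int) × Int := ([[60, 5, 0], [62, 5, 4]], 8)

def Spec_get_dur (avgs : List (List Int)) (duration : Int) (out : List (List Int)) : Prop := out = get_dur_alt avgs duration
instance (avgs : List (List Int)) (duration : Int) (out : List (List Int)) : Decidable (Spec_get_dur avgs duration out) := by unfold Spec_get_dur; infer_instance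

-- ===== CLAIM (what is proved, stated in full; the proofs are below) =====
def Claim_equal_get_dur : Prop := ∀ (avgs : List (List Int)) (duration : Int), Dom_get_dur avgs duration → Pre_get_dur avgs duration → Spec_get_dur avgs duration (get_dur avgs duration)

-- ===== LEMMAS AND PROOFS =====

-- proof-only middle form: the rows zipped with (time, shifted time) pairs
def pvMid (avgs : List (List Int)) (duration : Int) : List (List Int) :=
  let times := avgs.map (fun a => PySem.List.pyGetD a 2 0)
  (avgs.zip (times.zip (times.drop 1 ++ [duration]))).map (fun p => p.1 ++ [p.2.2 - p.2.1])

theorem fold_set_length (ds : List Int) (l : List Int) (st : List (List Int)) :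
    (l.foldl (fun st i =>
      st.set i.toNat (PySem.List.pyGetD st i [] ++ [PySem.List.pyGetD ds i 0])) st).length
      = st.length := by
  induction l generalizing st with
  | nil => rfl
  | cons i l ih => simp [List.foldl_cons, ih]

theorem fold_set_getD (ds : List Int) (l : List Int) (st : List (List Int))
    (hnd : l.Nodup) (hb : ∀ i ∈ l, 0 ≤ i ∧ i < (st.length : Int)) (j : Nat) :
    (l.foldl (fun st i =>
      st.set i.toNat (PySem.List.pyGetD st i [] ++ [PySem.List.pyGetD ds i 0])) st).getD j []
      = if (j : Int) ∈ l then st.getD j [] ++ [PySem.List.pyGetD ds (j : Int) 0]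
        else st.getD j [] := by
  induction l generalizing st with
  | nil => simp
  | cons i l ih =>
    obtain ⟨hi0, hilt⟩ := hb i (List.mem_cons_self ..)
    have hnd' := (List.nodup_cons.mp hnd).2
    have hni : i ∉ l := (List.nodup_cons.mp hnd).1
    set v := PySem.List.pyGetD st i [] ++ [PySem.List.pyGetD ds i 0] with hv
    have hlen : (st.set i.toNat v).length = st.length := by simp
    rw [List.foldl_cons, ih (st.set i.toNat v) hnd'
      (fun i' hi' => by rw [hlen]; exact hb i' (List.mem_cons_of_mem _ hi'))]
    by_cases hm : (j : Int) ∈ l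
    · have hji : (j : Int) ≠ i := fun h => hni (h ▸ hm)
      have : j ≠ i.toNat := fun h => hji (by omega)
      simp [List.mem_cons, hm, List.getD, List.getElem?_set_ne (by omega : i.toNat ≠ j)]
    · by_cases hji : (j : Int) = i
      · subst hji
        have hjl : j < st.length := by omega
        rw [if_neg hm, if_pos (List.mem_cons_self ..)]
        simp only [Int.toNat_natCast] at *
        rw [List.getD, List.getElem?_set_self (by omega), Option.getD_some, hv,
          PySem.List.pyGetD_natCast]
      · have : i.toNat ≠ j := fun h => hji (by omega)
        simp [List.mem_cons, hm, hji, List.getD, List.getElem?_set_ne this]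

theorem get_dur_eq_mid (avgs : List (List Int)) (duration : Int) :
    get_dur avgs duration = pvMid avgs duration := by
  simp only [get_dur, pvMid]
  set ts := avgs.map (fun avg => PySem.List.pyGetD avg 2 0) with hts
  set notes := avgs.map (fun avg => PySem.List.pyGetD avg 0 0) with hnotes
  set g : Int × Int → Int := fun p =>
    if p.1 < (ts.length : Int) - 1 then
      PySem.List.pyGetD ts (p.1 + 1) 0 - PySem.List.pyGetD ts p.1 0
    else duration - PySem.List.pyGetD ts p.1 0 with hg
  have hfun : (fun (durs : List Int) (p : Int × Int) =>
      if p.1 < (ts.length : Int) - 1 then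
        durs ++ [PySem.List.pyGetD ts (p.1 + 1) 0 - PySem.List.pyGetD ts p.1 0]
      else durs ++ [duration - PySem.List.pyGetD ts p.1 0])
      = fun durs p => durs ++ [g p] := by
    funext d p; by_cases h : p.1 < (ts.length : Int) - 1 <;> simp [hg, h]
  rw [hfun, PySem.List.foldl_append_singleton_eq_map, List.nil_append]
  set durs := (PySem.List.enumerate notes).map g with hdurs
  have hdlen : durs.length = avgs.length := by
    simp [hdurs, PySem.List.length_enumerate, hnotes]
  have htlen : ts.length = avgs.length := by simp [hts]
  have hLlen : ∀ st : List (List Int), (((PySem.List.pyRange 0 (durs.length : Int) 1)).foldl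
      (fun st i => st.set i.toNat (PySem.List.pyGetD st i [] ++ [PySem.List.pyGetD durs i 0])) st).length
      = st.length := fun st => fold_set_length durs _ st
  apply List.ext_getElem
  · rw [hLlen]
    simp only [List.length_map, List.length_zip, List.length_append,
      List.length_drop, List.length_cons, List.length_nil, htlen]
    omega
  · intro j h1 h2
    have hjn : j < avgs.length := by rw [hLlen] at h1; exact h1
    rw [← List.getD_eq_getElem _ [] h1, ← List.getD_eq_getElem _ [] h2]
    rw [fold_set_getD durs (PySem.List.pyRange 0 (durs.length : Int) 1) avgs
      (PySem.List.nodup_pyRange_one 0 (durs.length : Int))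
      (fun i hi => by
        rw [PySem.List.mem_pyRange_one] at hi
        refine ⟨hi.1, ?_⟩
        have := hdlen; omega)]
    rw [if_pos (by rw [PySem.List.mem_pyRange_one]; constructor <;> omega)]
    rw [PySem.List.pyGetD_natCast]
    have hdj : durs.getD j 0 = g ((j : Int), (0 : Int)) := by
      have hjn' : j < notes.length := by simp [hnotes]; omega
      rw [hdurs, List.getD_eq_getElem?_getD, List.getElem?_map,
        PySem.List.getElem?_enumerate, List.getElem?_eq_getElem hjn']
      simp only [Option.map_some, Option.getD_some, hg, zero_add]
    rw [hdj]
    have hR : (List.map (fun p => p.1 ++ [p.2.2 - p.2.1])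
        (avgs.zip (ts.zip (List.drop 1 ts ++ [duration])))).getD j []
        = avgs.getD j [] ++ [(List.drop 1 ts ++ [duration]).getD j 0 - ts.getD j 0] := by
      rw [List.getD_eq_getElem _ [] h2]
      simp only [List.getElem_map, List.getElem_zip]
      rw [← List.getD_eq_getElem avgs [] hjn]
      rw [← List.getD_eq_getElem ts 0 (by omega)]
      rw [← List.getD_eq_getElem (List.drop 1 ts ++ [duration]) 0
        (by simp only [List.length_append, List.length_drop, List.length_cons,
              List.length_nil]; omega)]
    rw [hR]
    congr 1
    have hts1 : PySem.List.pyGetD ts ((j : Int)) 0 = ts.getD j 0 := PySem.List.pyGetD_natCast ..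
    by_cases hc : j < ts.length - 1
    · have hsh : (List.drop 1 ts ++ [duration]).getD j 0 = ts.getD (j + 1) 0 := by
        rw [List.getD_eq_getElem?_getD, List.getElem?_append_left (by simp; omega),
          List.getElem?_drop, List.getElem?_eq_getElem (show 1 + j < ts.length by omega),
          Option.getD_some, List.getD_eq_getElem ts 0 (show j + 1 < ts.length by omega)]
        congr 1
        omega
      rw [hsh, hg]
      simp only []
      rw [if_pos (by omega)]
      rw [show ((j : Int) + 1) = (((j + 1 : Nat)) : Int) by push_cast; ring,
        PySem.List.pyGetD_natCast, hts1]
    · have hj1 : j = ts.length - 1 := by omega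
      have hsh : (List.drop 1 ts ++ [duration]).getD j 0 = duration := by
        rw [List.getD_eq_getElem?_getD, List.getElem?_append_right (by simp; omega)]
        simp only [List.length_drop]
        rw [show j - (ts.length - 1) = 0 by omega]
        rfl
      rw [hsh, hg]
      simp only []
      rw [if_neg (by omega), hts1]

theorem alt_foldr (avgs : List (List Int)) (duration : Int) :
    avgs.foldr (fun a (p : Int × List (List Int)) =>
        (PySem.List.pyGetD a 2 0, (a ++ [p.1 - PySem.List.pyGetD a 2 0]) :: p.2))
      (duration, [])
      = ((avgs.map (fun a => PySem.List.pyGetD a 2 0)).headD duration,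
         pvMid avgs duration) := by
  induction avgs with
  | nil => rfl
  | cons a rest ih =>
    rw [List.foldr_cons, ih]
    cases rest with
    | nil => simp [pvMid]
    | cons b rs => simp [pvMid]

theorem get_dur_alt_eq_mid (avgs : List (List Int)) (duration : Int) :
    get_dur_alt avgs duration = pvMid avgs duration := by
  unfold get_dur_alt
  rw [List.foldl_reverse, alt_foldr]

-- ===== VERDICT (by name: the statement is the Claim_ definition above) =====
theorem get_dur_spec : Claim_equal_get_dur := by
  intro avgs duration _ _
  unfold Spec_get_dur
  rw [get_dur_eq_mid, get_dur_alt_eq_mid]
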